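-- pv_equiv track=rewrite | github.com/ace-wu/oj | leetcode/1915-number-of-wonderful-substrings.py | wonderfulSubstrings
-- ===== SOURCE A (Python) =====
-- import collections
--
-- def wonderfulSubstrings(word: str) -> int:
--     mask_map = {chr(ord('a') + i): 1 << i for i in range(10)}
--     mask_count = collections.defaultdict(int)  # prefix_mask -> count
--     prefix_mask = 0
--     count = 0
--     for c in word:
--         prefix_mask ^= mask_map[c]
--         count += mask_count[prefix_mask]
--         for mask in mask_map.values():
--             count += mask_count[prefix_mask ^ mask]
--         if prefix_mask == 0 or (prefix_mask & (prefix_mask - 1)) == 0: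
--             count += 1
--         mask_count[prefix_mask] += 1
--     return count
-- ===== SOURCE B (Python) =====
-- def wonderfulSubstrings(word: str) -> int:
--     mask_map = {chr(ord('a') + i): 1 << i for i in range(10)}
--     count = 0
--     for i in range(len(word)):
--         mask = 0
--         for j in range(i, len(word)):
--             mask ^= mask_map[word[j]]
--             if mask == 0 or mask & (mask - 1) == 0:
--                 count += 1
--     return count
-- ===== Notes on version B (the rewrite author's own statement) =====
-- stated objective: alternative
-- what changed: Replaced the prefix-parity hashmap (counting earlier equal/one-bit-off prefix masks) by a direct double loop that enumerates every substring with a running parity mask and tests it for at most one odd bit.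
import Mathlib
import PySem

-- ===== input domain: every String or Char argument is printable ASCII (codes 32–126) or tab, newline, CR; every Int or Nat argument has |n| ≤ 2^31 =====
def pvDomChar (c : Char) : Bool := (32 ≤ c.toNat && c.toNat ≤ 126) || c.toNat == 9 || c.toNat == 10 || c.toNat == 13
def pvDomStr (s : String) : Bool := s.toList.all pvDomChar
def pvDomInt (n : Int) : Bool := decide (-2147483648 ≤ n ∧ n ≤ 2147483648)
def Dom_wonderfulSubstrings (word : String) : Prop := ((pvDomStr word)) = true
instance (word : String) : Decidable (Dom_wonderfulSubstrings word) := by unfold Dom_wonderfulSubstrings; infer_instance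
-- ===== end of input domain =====

-- B replaces A's one-pass prefix-parity hashmap count by a brute-force double loop over all
-- substrings with a running parity mask (alternative decomposition, not faster).

-- ===== PORT A =====
-- mask_map = {chr(ord('a') + i): 1 << i for i in range(10)}
def wsMaskMapA : PySem.Dict Char Nat :=
  (PySem.List.pyRange 0 10 1).foldl
    (fun d i => d.insert (Char.ofNat (97 + i.toNat)) (1 <<< i.toNat)) PySem.Dict.empty

-- one iteration of A's loop body; state = (mask_count, prefix_mask, count).
-- mask_map[c] is ported as getD c 0: on a char outside 'a'..'j' Python raises KeyError,
-- and exactly those inputs are excluded by Pre_wonderfulSubstrings.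
def wsStepA (st : PySem.Dict Nat Int × Nat × Int) (c : Char) : PySem.Dict Nat Int × Nat × Int :=
  let pm := st.2.1 ^^^ wsMaskMapA.getD c 0
  let cnt := st.2.2 + st.1.getD pm 0
  let cnt := wsMaskMapA.values.foldl (fun cnt mask => cnt + st.1.getD (pm ^^^ mask) 0) cnt
  let cnt := if pm == 0 || (pm &&& (pm - 1)) == 0 then cnt + 1 else cnt
  (st.1.insert pm (st.1.getD pm 0 + 1), pm, cnt)

def wonderfulSubstrings (word : String) : Int :=
  (word.toList.foldl wsStepA (PySem.Dict.empty, 0, 0)).2.2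

-- ===== PORT B =====
-- inner loop: scan word[i:] keeping the running parity mask (KeyError chars excluded by Pre_)
def wsInner : List Char → Nat → Int → Int
  | [], _, cnt => cnt
  | c :: rest, mask, cnt =>
      let mask := mask ^^^ wsMaskMapA.getD c 0
      wsInner rest mask (if mask == 0 || (mask &&& (mask - 1)) == 0 then cnt + 1 else cnt)

-- outer loop: one inner scan per start index
def wsOuter : List Char → Int → Int
  | [], cnt => cnt
  | c :: rest, cnt => wsOuter rest (wsInner (c :: rest) 0 cnt)

-- (Source B builds the identical mask_map = {chr(97+i): 1<<i}; the port reuses the same literal dict)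
def wonderfulSubstrings_alt (word : String) : Int := wsOuter word.toList 0

-- ===== PRECONDITION & SPEC =====
-- Pre_ excludes exactly the inputs on which A raises KeyError (a character outside 'a'..'j');
-- B raises the same KeyError there.
def Pre_wonderfulSubstrings (word : String) : Prop :=
  (word.toList.all (fun c => decide ('a' ≤ c) && decide (c ≤ 'j'))) = true
instance (word : String) : Decidable (Pre_wonderfulSubstrings word) := by
  unfold Pre_wonderfulSubstrings; infer_instance

def pvWitness_wonderfulSubstrings : String := "ab"

def Spec_wonderfulSubstrings (word : String) (out : Int) : Prop := out = wonderfulSubstrings_alt word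
instance (word : String) (out : Int) : Decidable (Spec_wonderfulSubstrings word out) := by unfold Spec_wonderfulSubstrings; infer_instance

-- ===== CLAIM (what is proved, stated in full; the proofs are below) =====
def Claim_equal_wonderfulSubstrings : Prop := ∀ (word : String), Dom_wonderfulSubstrings word → Pre_wonderfulSubstrings word → Spec_wonderfulSubstrings word (wonderfulSubstrings word)

-- ===== LEMMAS AND PROOFS =====

-- the ten single-bit masks, in dict-value order
def wsMV : List Nat := [1, 2, 4, 8, 16, 32, 64, 128, 256, 512]

def wsM (c : Char) : Nat := wsMaskMapA.getD c 0

-- parity mask of a character list (xor of the ten letter bits)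
def wsPL (l : List Char) : Nat := l.foldl (fun a c => a ^^^ wsM c) 0

-- 0/1 indicator of "at most one odd letter"
def wsInd (x : Nat) : Int := if x == 0 || (x &&& (x - 1)) == 0 then 1 else 0

-- parity masks of the nonempty prefixes, in order
def wsMpre : List Char → List Nat
  | [] => []
  | c :: r => wsM c :: (wsMpre r).map (wsM c ^^^ ·)

-- sum of wsInd over the xor of every ordered pair (the number of wonderful substrings)
def wsPairTotal : List Nat → Int
  | [] => 0
  | x :: xs => (xs.map (fun y => wsInd (x ^^^ y))).sum + wsPairTotal xs

-- the common specification value: total over all prefix-mask pairs (0 = empty prefix)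
def wsT (l : List Char) : Int := wsPairTotal (0 :: wsMpre l)

lemma char_mem10 {c : Char} (h1 : 'a' ≤ c) (h2 : c ≤ 'j') :
    c ∈ ['a','b','c','d','e','f','g','h','i','j'] := by
  have g1 : 'a'.toNat ≤ c.toNat := Fin.mk_le_mk.mp h1
  have g2 : c.toNat ≤ 'j'.toNat := Fin.mk_le_mk.mp h2
  have e1 : 'a'.toNat = 97 := rfl
  have e2 : 'j'.toNat = 106 := rfl
  rw [e1] at g1; rw [e2] at g2
  have h : c.toNat = 97 ∨ c.toNat = 98 ∨ c.toNat = 99 ∨ c.toNat = 100 ∨ c.toNat = 101 ∨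
      c.toNat = 102 ∨ c.toNat = 103 ∨ c.toNat = 104 ∨ c.toNat = 105 ∨ c.toNat = 106 := by omega
  have hc : c = Char.ofNat c.toNat := (Char.ofNat_toNat c).symm
  rcases h with h|h|h|h|h|h|h|h|h|h <;> rw [hc, h] <;> decide

lemma wsValues_eq : wsMaskMapA.values = wsMV := by decide

lemma wsM_lt {c : Char} (h : c ∈ ['a','b','c','d','e','f','g','h','i','j']) : wsM c < 1024 := by
  fin_cases h <;> decide

lemma xor_lt {a b : Nat} (ha : a < 1024) (hb : b < 1024) : a ^^^ b < 1024 := by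
  have := Nat.xor_lt_two_pow (n := 10) (by simpa using ha) (by simpa using hb)
  simpa using this

lemma xor_cancel_left (a x y : Nat) : (a ^^^ x) ^^^ (a ^^^ y) = x ^^^ y := by
  rw [Nat.xor_comm a x, Nat.xor_assoc, ← Nat.xor_assoc a a y, Nat.xor_self, Nat.zero_xor]

lemma wsPL_shift : ∀ (l : List Char) (i : Nat), l.foldl (fun a c => a ^^^ wsM c) i = i ^^^ wsPL l := by
  intro l
  induction l with
  | nil => intro i; simp [wsPL]
  | cons d r ih =>
      intro i
      show List.foldl _ (i ^^^ wsM d) r = _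
      rw [ih]
      show _ = i ^^^ List.foldl _ (0 ^^^ wsM d) r
      rw [ih (0 ^^^ wsM d), Nat.zero_xor, Nat.xor_assoc]

lemma wsPL_cons (c : Char) (l : List Char) : wsPL (c :: l) = wsM c ^^^ wsPL l := by
  show List.foldl _ (0 ^^^ wsM c) l = _
  rw [wsPL_shift, Nat.zero_xor]

lemma wsPL_append_singleton (l : List Char) (c : Char) :
    wsPL (l ++ [c]) = wsPL l ^^^ wsM c := by
  simp [wsPL, List.foldl_append]

lemma wsMpre_append_singleton (l : List Char) (c : Char) :
    wsMpre (l ++ [c]) = wsMpre l ++ [wsPL (l ++ [c])] := by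
  induction l with
  | nil => simp [wsMpre, wsPL]
  | cons a r ih =>
      simp only [List.cons_append, wsMpre, ih, List.map_append, List.map_cons, List.map_nil,
        wsPL_cons, wsPL_append_singleton]

lemma wsPL_lt {l : List Char} (h : ∀ c ∈ l, c ∈ ['a','b','c','d','e','f','g','h','i','j']) :
    wsPL l < 1024 := by
  induction l with
  | nil => simp [wsPL]
  | cons c r ih =>
      rw [wsPL_cons]
      exact xor_lt (wsM_lt (h c (by simp))) (ih (fun d hd => h d (by simp [hd])))

lemma wsMpre_lt {l : List Char} (h : ∀ c ∈ l, c ∈ ['a','b','c','d','e','f','g','h','i','j']) :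
    ∀ y ∈ wsMpre l, y < 1024 := by
  induction l with
  | nil => simp [wsMpre]
  | cons c r ih =>
      intro y hy
      have hc := wsM_lt (h c (by simp))
      simp only [wsMpre, List.mem_cons, List.mem_map] at hy
      rcases hy with rfl | ⟨z, hz, rfl⟩
      · exact hc
      · exact xor_lt hc (ih (fun d hd => h d (by simp [hd])) z hz)

-- characterization of wsInd on masks below 2^10: indicator of the eleven good values
set_option maxRecDepth 8192 in
lemma wsInd_char : ∀ x : Nat, x < 1024 →
    wsInd x = ((0 :: wsMV).map (fun m => if x = m then (1 : Int) else 0)).sum := by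
  decide

lemma xor_shift (y p m : Nat) : (y = p ^^^ m) ↔ (y ^^^ p = m) := by
  constructor
  · rintro rfl; rw [Nat.xor_comm p m, Nat.xor_assoc, Nat.xor_self, Nat.xor_zero]
  · rintro rfl; rw [Nat.xor_comm y p, ← Nat.xor_assoc, Nat.xor_self, Nat.zero_xor]

lemma xor_zero_iff (y p : Nat) : (y = p) ↔ (y ^^^ p = 0) := by
  rw [Nat.xor_eq_zero_iff]

-- per-element form of A's three count increments
lemma wsPerElem {y p : Nat} (hy : y < 1024) (hp : p < 1024) :
    (if y = p then (1 : Int) else 0) +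
      (wsMV.map (fun m => if y = p ^^^ m then (1 : Int) else 0)).sum = wsInd (y ^^^ p) := by
  rw [wsInd_char (y ^^^ p) (xor_lt hy hp)]
  simp only [xor_zero_iff y p, xor_shift y p]
  simp [wsMV]

-- A's per-step count increment equals the sum of indicators over earlier prefix masks
lemma wsCore {M : List Nat} {p : Nat} (hM : ∀ y ∈ M, y < 1024) (hp : p < 1024) :
    ((M.count p : Int)) + (wsMV.map (fun m => (M.count (p ^^^ m) : Int))).sum
      = (M.map (fun y => wsInd (y ^^^ p))).sum := by
  induction M with
  | nil => simp
  | cons y M' ih =>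
      have hy : y < 1024 := hM y (by simp)
      have ih' := ih (fun z hz => hM z (by simp [hz]))
      have hpe := wsPerElem (y := y) (p := p) hy hp
      simp only [List.count_cons, List.map_cons, List.sum_cons, beq_iff_eq]
      push_cast
      have hsplit : (wsMV.map (fun m => ((M'.count (p ^^^ m) : Int) +
          if y = p ^^^ m then 1 else 0))).sum
          = (wsMV.map (fun m => (M'.count (p ^^^ m) : Int))).sum +
            (wsMV.map (fun m => if y = p ^^^ m then (1 : Int) else 0)).sum := by
        simp [wsMV]; ring
      rw [hsplit]
      linarith [ih', hpe]

lemma wsPairTotal_append_singleton (xs : List Nat) (x : Nat) :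
    wsPairTotal (xs ++ [x]) = wsPairTotal xs + (xs.map (fun y => wsInd (y ^^^ x))).sum := by
  induction xs with
  | nil => simp [wsPairTotal]
  | cons a r ih =>
      simp only [List.cons_append, wsPairTotal, ih, List.map_append, List.sum_append,
        List.map_cons, List.map_nil, List.sum_cons, List.sum_nil]
      ring

lemma wsPairTotal_map_xor (a : Nat) (xs : List Nat) :
    wsPairTotal (xs.map (a ^^^ ·)) = wsPairTotal xs := by
  induction xs with
  | nil => simp
  | cons x r ih =>
      simp only [List.map_cons, wsPairTotal, ih, List.map_map]
      congr 1
      apply congrArg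
      apply List.map_congr_left
      intro y _
      simp [Function.comp, xor_cancel_left]

lemma wsInner_eq (cs : List Char) : ∀ (mask : Nat) (cnt : Int),
    wsInner cs mask cnt = cnt + ((wsMpre cs).map (fun y => wsInd (mask ^^^ y))).sum := by
  induction cs with
  | nil => intro mask cnt; simp [wsInner, wsMpre]
  | cons c r ih =>
      intro mask cnt
      show wsInner r (mask ^^^ wsM c) _ = _
      rw [ih]
      simp only [show wsMaskMapA.getD c 0 = wsM c from rfl]
      have hif : (if (mask ^^^ wsM c) == 0 || ((mask ^^^ wsM c) &&& ((mask ^^^ wsM c) - 1)) == 0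
          then cnt + 1 else cnt) = cnt + wsInd (mask ^^^ wsM c) := by
        simp only [wsInd]; split <;> simp
      rw [hif]
      simp only [wsMpre, List.map_cons, List.sum_cons, List.map_map]
      have hm : ((wsMpre r).map ((fun y => wsInd (mask ^^^ y)) ∘ (wsM c ^^^ ·))).sum
          = ((wsMpre r).map (fun y => wsInd ((mask ^^^ wsM c) ^^^ y))).sum := by
        apply congrArg
        apply List.map_congr_left
        intro y _
        simp [Function.comp, Nat.xor_assoc]
      rw [hm]
      ring

lemma wsT_cons (c : Char) (r : List Char) :
    wsT (c :: r) = ((wsMpre (c :: r)).map (fun y => wsInd (0 ^^^ y))).sum + wsT r := by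
  show wsPairTotal (0 :: wsMpre (c :: r)) = _
  have h1 : wsPairTotal (0 :: wsMpre (c :: r))
      = ((wsMpre (c :: r)).map (fun y => wsInd (0 ^^^ y))).sum + wsPairTotal (wsMpre (c :: r)) := rfl
  have h2 : wsPairTotal (wsMpre (c :: r)) = wsT r := by
    show wsPairTotal (wsM c :: (wsMpre r).map (wsM c ^^^ ·)) = wsPairTotal (0 :: wsMpre r)
    simp only [wsPairTotal, List.map_map, wsPairTotal_map_xor]
    congr 1
    apply congrArg
    apply List.map_congr_left
    intro y _
    simp [Function.comp, Nat.zero_xor]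
  rw [h1, h2]

lemma wsOuter_eq (cs : List Char) : ∀ cnt : Int, wsOuter cs cnt = cnt + wsT cs := by
  induction cs with
  | nil => intro cnt; simp [wsOuter, wsT, wsPairTotal, wsMpre]
  | cons c r ih =>
      intro cnt
      rw [wsOuter, ih, wsInner_eq, wsT_cons]
      ring

-- A's loop invariant: dict = multiset of earlier prefix masks, count = pair total so far
lemma wsA_inv (l : List Char) (h : ∀ c ∈ l, c ∈ ['a','b','c','d','e','f','g','h','i','j']) :
    (∀ Q : Nat, (l.foldl wsStepA (PySem.Dict.empty, 0, 0)).1.getD Q 0 = ((wsMpre l).count Q : Int))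
    ∧ (l.foldl wsStepA (PySem.Dict.empty, 0, 0)).2.1 = wsPL l
    ∧ (l.foldl wsStepA (PySem.Dict.empty, 0, 0)).2.2 = wsT l := by
  induction l using List.reverseRecOn with
  | nil =>
      refine ⟨fun Q => ?_, rfl, rfl⟩
      simp [wsMpre, PySem.Dict.getD_empty]
  | append_singleton l c ih =>
      have hl : ∀ d ∈ l, d ∈ ['a','b','c','d','e','f','g','h','i','j'] :=
        fun d hd => h d (by simp [hd])
      obtain ⟨ihD, ihP, ihC⟩ := ih hl
      rw [List.foldl_append]
      set st := l.foldl wsStepA (PySem.Dict.empty, 0, 0) with hst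
      have hp' : st.2.1 ^^^ wsMaskMapA.getD c 0 = wsPL (l ++ [c]) := by
        rw [ihP, wsPL_append_singleton]; rfl
      have hplt : wsPL (l ++ [c]) < 1024 := wsPL_lt (l := l ++ [c]) h
      have hMlt := wsMpre_lt hl
      refine ⟨fun Q => ?_, ?_, ?_⟩
      · show (st.1.insert _ _).getD Q 0 = _
        rw [hp', PySem.Dict.getD_insert, wsMpre_append_singleton, List.count_append]
        by_cases hQ : Q = wsPL (l ++ [c])
        · subst hQ; rw [if_pos rfl, ihD]; simp
        · rw [if_neg hQ, ihD]
          simp [Ne.symm hQ]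
      · exact hp'
      · show (if _ then _ + 1 else _) = wsT (l ++ [c])
        rw [hp']
        set p := wsPL (l ++ [c]) with hpdef
        rw [wsValues_eq, PySem.List.foldl_add wsMV (fun mask => st.1.getD (p ^^^ mask) 0)]
        have hmap : wsMV.map (fun mask => st.1.getD (p ^^^ mask) 0)
            = wsMV.map (fun mask => ((wsMpre l).count (p ^^^ mask) : Int)) :=
          List.map_congr_left (fun m _ => ihD (p ^^^ m))
        rw [hmap, ihD, ihC]
        have hT : wsT (l ++ [c]) = wsT l + wsInd (0 ^^^ p) +
            ((wsMpre l).map (fun y => wsInd (y ^^^ p))).sum := by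
          show wsPairTotal (0 :: wsMpre (l ++ [c])) = _
          rw [wsMpre_append_singleton]
          rw [show (0 :: (wsMpre l ++ [wsPL (l ++ [c])])) = (0 :: wsMpre l) ++ [p] from rfl]
          rw [wsPairTotal_append_singleton]
          simp only [List.map_cons, List.sum_cons]
          show _ = wsPairTotal (0 :: wsMpre l) + _ + _
          ring
        rw [hT, ← wsCore hMlt hplt]
        have hzp : wsInd (0 ^^^ p) = wsInd p := by rw [Nat.zero_xor]
        rw [hzp]
        simp only [wsInd]
        split <;> ring

-- ===== VERDICT (by name: the statement is the Claim_ definition above) =====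
theorem wonderfulSubstrings_spec : Claim_equal_wonderfulSubstrings := by
  intro word _ hpre
  have hpre' : ∀ c ∈ word.toList, c ∈ ['a','b','c','d','e','f','g','h','i','j'] := by
    intro c hc
    have h := List.all_eq_true.mp hpre c hc
    simp only [Bool.and_eq_true, decide_eq_true_eq] at h
    exact char_mem10 h.1 h.2
  unfold Spec_wonderfulSubstrings wonderfulSubstrings wonderfulSubstrings_alt
  rw [(wsA_inv word.toList hpre').2.2, wsOuter_eq, zero_add]
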